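-- pv_equiv track=rewrite | github.com/JayFoxRox/pykdclient | windpl.py | hexformat
-- ===== SOURCE A (Python) =====
-- def hexformat(buf):
--     length = len(buf)
--     if length == 0:
--         return None
--
--     b = "0000  "
--     c = 0
--     for x in buf:
--         c += 1
--         b += "%02x " % x
--         if (c % 16) == 0 and c < length:
--             b += "\n%04x " % c
--
--     if b[-1] != "\n":
--         b += "\n"
--
--     return b
-- ===== SOURCE B (Python) =====
-- def hexformat(buf):
--     if len(buf) == 0:
--         return None
--     lines = []
--     for i in range(0, len(buf), 16):
--         chunk = buf[i:i + 16]
--         header = "0000  " if i == 0 else "%04x " % i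
--         lines.append(header + "".join("%02x " % x for x in chunk))
--     return "\n".join(lines) + "\n"
-- ===== Notes on version B (the rewrite author's own statement) =====
-- stated objective: simpler
-- what changed: Replaced A's single per-byte loop with a counter and modulo-16 branch (plus a trailing-newline patch-up) by a chunked pass: iterate over 16-byte slices, build each line as header + joined byte fields, and join the lines with newlines.
import Mathlib
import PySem

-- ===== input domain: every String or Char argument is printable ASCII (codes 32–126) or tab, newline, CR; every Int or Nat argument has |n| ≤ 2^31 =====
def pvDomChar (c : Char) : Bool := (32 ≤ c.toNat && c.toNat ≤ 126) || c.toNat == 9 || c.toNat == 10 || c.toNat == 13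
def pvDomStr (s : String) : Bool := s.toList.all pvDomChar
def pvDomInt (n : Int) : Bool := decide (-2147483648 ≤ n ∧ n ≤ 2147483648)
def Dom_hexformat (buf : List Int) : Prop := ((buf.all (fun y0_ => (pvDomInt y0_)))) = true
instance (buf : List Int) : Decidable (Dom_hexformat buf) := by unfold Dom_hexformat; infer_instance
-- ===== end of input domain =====

-- B replaces A's per-byte counter-and-modulo loop by a chunked pass over 16-byte slices
-- joined with "\n" (objective: simpler); return values agree on every input.

-- shared helper: Python's "%0<width>x" % x (lowercase hex, zero-padded; '-' counts toward the width)
def pyHexFmt (width : Nat) (x : Int) : String :=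
  if x < 0 then
    String.ofList ('-' :: (List.replicate (width - 1 - (Nat.toDigits 16 x.natAbs).length) '0'
      ++ Nat.toDigits 16 x.natAbs))
  else
    String.ofList (List.replicate (width - (Nat.toDigits 16 x.natAbs).length) '0'
      ++ Nat.toDigits 16 x.natAbs)

-- ===== PORT A =====
def hexformat (buf : List Int) : Option String :=
  let length : Int := buf.length
  if length = 0 then none
  else
    let st := buf.foldl (fun (st : String × Int) x =>
      let c := st.2 + 1
      let b := st.1 ++ pyHexFmt 2 x ++ " "
      let b := if c % 16 = 0 ∧ c < length then b ++ "\n" ++ pyHexFmt 4 c ++ " " else b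
      (b, c)) ("0000  ", (0 : Int))
    let b := if PySem.Str.pyGet? st.1 (-1) ≠ some '\n' then st.1 ++ "\n" else st.1
    some b

-- ===== PORT B =====
def hexformat_alt (buf : List Int) : Option String :=
  if buf.length = 0 then none
  else
    let lines := (PySem.List.pyRange 0 buf.length 16).map (fun i =>
      let chunk := PySem.List.slice buf (some i) (some (i + 16))
      let header := if i = 0 then "0000  " else pyHexFmt 4 i ++ " "
      header ++ PySem.Str.join "" (chunk.map (fun x => pyHexFmt 2 x ++ " ")))
    some (PySem.Str.join "\n" lines ++ "\n")

-- ===== PRECONDITION & SPEC =====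
def Spec_hexformat (buf : List Int) (out : Option String) : Prop := out = hexformat_alt buf
instance (buf : List Int) (out : Option String) : Decidable (Spec_hexformat buf out) := by unfold Spec_hexformat; infer_instance

-- ===== CLAIM (what is proved, stated in full; the proofs are below) =====
def Claim_equal_hexformat : Prop := ∀ (buf : List Int), Dom_hexformat buf → Spec_hexformat buf (hexformat buf)

-- ===== LEMMAS AND PROOFS =====

-- char-list building blocks of the output
def pvByteL (x : Int) : List Char := (pyHexFmt 2 x).toList ++ [' ']
def pvBytesL (xs : List Int) : List Char := (xs.map pvByteL).flatten
def pvSepL (n c : Int) : List Char :=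
  if c % 16 = 0 ∧ c < n then '\n' :: ((pyHexFmt 4 c).toList ++ [' ']) else []
def pvHeaderL (i : Int) : List Char :=
  if i = 0 then "0000  ".toList else (pyHexFmt 4 i).toList ++ [' ']

-- the tail of A's accumulated string after counter value c0, as a char list
def pvTailL (n c0 : Int) : List Int → List Char
  | [] => []
  | x :: xs => pvByteL x ++ pvSepL n (c0 + 1) ++ pvTailL n (c0 + 1) xs

theorem pvFold_eq (n : Int) (xs : List Int) : ∀ (b0 : String) (c0 : Int),
    (xs.foldl (fun (st : String × Int) x =>
      let c := st.2 + 1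
      let b := st.1 ++ pyHexFmt 2 x ++ " "
      let b := if c % 16 = 0 ∧ c < n then b ++ "\n" ++ pyHexFmt 4 c ++ " " else b
      (b, c)) (b0, c0)) =
    (String.ofList (b0.toList ++ pvTailL n c0 xs), c0 + xs.length) := by
  induction xs with
  | nil => intro b0 c0; simp [pvTailL, String.ofList_toList]
  | cons x xs ih =>
    intro b0 c0
    simp only [List.foldl_cons]
    rw [ih]
    rw [Prod.mk.injEq]
    refine ⟨?_, ?_⟩
    · apply String.toList_inj.mp
      simp only [String.toList_ofList, pvTailL, pvByteL, pvSepL]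
      split_ifs with h
      · simp [String.toList_append]
      · simp [String.toList_append]
    · simp only [List.length_cons]; push_cast; omega

theorem pvTail_append (n : Int) (xs ys : List Int) (c0 : Int) :
    pvTailL n c0 (xs ++ ys) = pvTailL n c0 xs ++ pvTailL n (c0 + xs.length) ys := by
  induction xs generalizing c0 with
  | nil => simp [pvTailL]
  | cons x xs ih =>
    simp only [List.cons_append, pvTailL, ih, List.length_cons]
    have : c0 + 1 + (xs.length : Int) = c0 + ((xs.length : Int) + 1) := by omega
    simp [this, List.append_assoc]

theorem pvTail_no_sep (n : Int) (xs : List Int) : ∀ (c0 : Int),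
    (∀ j : Nat, j < xs.length → ¬((c0 + j + 1) % 16 = 0 ∧ c0 + j + 1 < n)) →
    pvTailL n c0 xs = pvBytesL xs := by
  induction xs with
  | nil => intro c0 h; simp [pvTailL, pvBytesL]
  | cons x xs ih =>
    intro c0 h
    have h0 := h 0 (by simp)
    simp only [pvTailL, pvSepL, pvBytesL, List.map_cons, List.flatten_cons]
    rw [if_neg (by simpa using h0), ih (c0 + 1) (fun j hj => by
      have := h (j + 1) (by simpa using Nat.succ_lt_succ hj)
      push_cast at this ⊢
      convert this using 3 <;> omega)]
    simp [pvBytesL]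

theorem pvTail_full_chunk (n : Int) (xs : List Int) (c0 : Int)
    (hlen : xs.length = 16) (hc : c0 % 16 = 0) (hlt : c0 + 16 < n) :
    pvTailL n c0 xs = pvBytesL xs ++ '\n' :: ((pyHexFmt 4 (c0 + 16)).toList ++ [' ']) := by
  obtain ⟨z, hz⟩ : ∃ z, xs.drop 15 = [z] := by
    rw [← List.length_eq_one_iff]
    simp [hlen]
  have hsplit : xs = xs.take 15 ++ [z] := by
    conv_lhs => rw [← List.take_append_drop 15 xs, hz]
  rw [hsplit, pvTail_append]
  have hlen15 : (xs.take 15).length = 15 := by simp [hlen]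
  rw [pvTail_no_sep n (xs.take 15) c0 (fun j hj => by
    rw [hlen15] at hj
    omega)]
  have hone : pvTailL n (c0 + (xs.take 15).length) [z] =
      pvByteL z ++ ('\n' :: ((pyHexFmt 4 (c0 + 16)).toList ++ [' '])) := by
    rw [hlen15]
    show pvByteL z ++ pvSepL n (c0 + 15 + 1) ++ pvTailL n (c0 + 15 + 1) [] = _
    have : c0 + 15 + 1 = c0 + 16 := by omega
    rw [this]
    rw [pvSepL, if_pos ⟨by omega, hlt⟩]
    simp [pvTailL]
  rw [hone]
  simp [pvBytesL, pvByteL]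

theorem pvTail_last (n : Int) (xs : List Int) : ∀ (c0 : Int), xs ≠ [] →
    (pvTailL n c0 xs).getLast? = some ' ' := by
  induction xs with
  | nil => intro c0 h; exact absurd rfl h
  | cons x xs ih =>
    intro c0 _
    show (pvByteL x ++ pvSepL n (c0 + 1) ++ pvTailL n (c0 + 1) xs).getLast? = some ' '
    by_cases hxs : xs = []
    · subst hxs
      simp only [pvTailL, List.append_nil, List.getLast?_append]
      unfold pvSepL
      split_ifs
      · rw [show ('\n' :: ((pyHexFmt 4 (c0 + 1)).toList ++ [' '])) =
            ('\n' :: (pyHexFmt 4 (c0 + 1)).toList) ++ [' '] from by simp,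
          List.getLast?_append]
        rfl
      · simp [pvByteL]
    · rw [List.getLast?_append, ih (c0 + 1) hxs]
      rfl

theorem pvRange16_cons (a b : Int) (h : a < b) :
    PySem.List.pyRange a b 16 = a :: PySem.List.pyRange (a + 16) b 16 := by
  rw [PySem.List.pyRange_of_pos a b (by norm_num), PySem.List.pyRange_of_pos (a + 16) b (by norm_num)]
  rw [if_pos h]
  have hc : ((b - a + 16 - 1) / 16).toNat =
      (if a + 16 < b then ((b - (a + 16) + 16 - 1) / 16).toNat else 0) + 1 := by
    split_ifs with h2 <;> omega
  rw [hc, List.range_succ_eq_map]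
  simp only [List.map_cons, List.map_map, Nat.cast_zero, mul_zero, add_zero, List.cons.injEq]
  refine ⟨trivial, List.map_congr_left fun k _ => ?_⟩
  simp [Function.comp]
  ring

theorem pvRange16_nil (a b : Int) (h : b ≤ a) : PySem.List.pyRange a b 16 = [] := by
  rw [PySem.List.pyRange_of_pos a b (by norm_num), if_neg (by omega)]
  simp

theorem pvIntercalate_cons (x : List Char) (xs : List (List Char)) (h : xs ≠ []) :
    List.intercalate ['\n'] (x :: xs) = x ++ '\n' :: List.intercalate ['\n'] xs := by
  match xs with
  | y :: ys => simp [List.intercalate, List.intersperse]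

-- the char list of one line of B
def pvLineL (buf : List Int) (i : Int) : List Char :=
  pvHeaderL i ++ pvBytesL (PySem.List.slice buf (some i) (some (i + 16)))

theorem pvChunks (buf : List Int) : ∀ (m c0 : Nat), buf.length - c0 = m →
    c0 % 16 = 0 → c0 < buf.length →
    List.intercalate ['\n'] ((PySem.List.pyRange c0 buf.length 16).map (pvLineL buf)) =
    pvHeaderL c0 ++ pvTailL buf.length c0 (buf.drop c0) := by
  intro m
  induction m using Nat.strong_induction_on with
  | _ m ih =>
    intro c0 hm hc hlt
    have hcast : ((c0 : Int)) < (buf.length : Int) := by exact_mod_cast hlt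
    rw [pvRange16_cons _ _ hcast]
    have h1 : ((c0 : Int)).toNat = c0 := Int.toNat_natCast c0
    have h2 : ((c0 : Int) + 16).toNat = c0 + 16 := by omega
    have hslice : PySem.List.slice buf (some (c0 : Int)) (some ((c0 : Int) + 16)) =
        (buf.drop c0).take 16 := by
      rw [PySem.List.slice_toNat _ (by positivity) (by positivity), h1, h2]
      congr 1
      omega
    by_cases hend : buf.length ≤ c0 + 16
    · -- last chunk
      rw [pvRange16_nil ((c0 : Int) + 16) (buf.length : Int) (by omega)]
      simp only [List.map_cons, List.map_nil]
      unfold pvLineL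
      rw [hslice, List.take_of_length_le (by simp; omega)]
      rw [pvTail_no_sep _ _ _ (fun j hj => by
        simp only [List.length_drop] at hj
        omega)]
      simp [List.intercalate, List.intersperse]
    · -- a full chunk followed by more
      have hend2 : c0 + 16 < buf.length := Nat.lt_of_not_le hend
      have hne : PySem.List.pyRange ((c0 : Int) + 16) (buf.length : Int) 16 ≠ [] := by
        rw [pvRange16_cons _ _ (by omega)]
        simp
      rw [List.map_cons, pvIntercalate_cons _ _ (by simpa using hne)]
      have hih := ih (buf.length - (c0 + 16)) (by omega) (c0 + 16) rfl (by omega) hend2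
      push_cast at hih
      rw [hih]
      have hdropsplit : buf.drop c0 = (buf.drop c0).take 16 ++ buf.drop (c0 + 16) := by
        conv_lhs => rw [← List.take_append_drop 16 (buf.drop c0)]
        simp [List.drop_drop]
      conv_rhs => rw [hdropsplit]
      rw [pvTail_append]
      have hlen16 : ((buf.drop c0).take 16).length = 16 := by simp; omega
      rw [hlen16]
      rw [pvTail_full_chunk (buf.length : Int) ((buf.drop c0).take 16) (c0 : Int) hlen16
        (by omega) (by omega)]
      unfold pvLineL pvHeaderL
      rw [hslice]
      rw [if_neg (show ¬((c0 : Int) + 16 = 0) by omega)]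
      push_cast
      simp [List.append_assoc]

theorem pvIntercalate_nil (l : List (List Char)) : List.intercalate [] l = l.flatten := by
  induction l with
  | nil => simp [List.intercalate]
  | cons x xs ih => cases xs <;> simp_all [List.intercalate, List.intersperse]

theorem pvLine_toList (buf : List Int) (i : Int) :
    ((if i = 0 then "0000  " else pyHexFmt 4 i ++ " ") ++
      PySem.Str.join "" ((PySem.List.slice buf (some i) (some (i + 16))).map
        (fun x => pyHexFmt 2 x ++ " "))).toList = pvLineL buf i := by
  rw [String.toList_append, PySem.Str.toList_join]
  unfold pvLineL pvHeaderL pvBytesL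
  congr 1
  · split_ifs <;> simp [String.toList_append]
  · show List.intercalate [] _ = _
    rw [pvIntercalate_nil]
    congr 1
    simp [List.map_map, Function.comp, pvByteL, String.toList_append]

theorem hexformat_spec : Claim_equal_hexformat := by
  unfold Claim_equal_hexformat
  intro buf _
  unfold Spec_hexformat hexformat hexformat_alt
  by_cases hb : buf.length = 0
  · have : buf = [] := List.length_eq_zero_iff.mp hb
    subst this
    norm_num
  · have hbne : buf ≠ [] := fun h => hb (by simp [h])
    have hn0 : ((buf.length : Int)) ≠ 0 := by exact_mod_cast hb
    rw [if_neg hn0, if_neg hb]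
    rw [pvFold_eq (buf.length : Int) buf "0000  " 0]
    have hlast : PySem.Str.pyGet?
        (String.ofList ("0000  ".toList ++ pvTailL (buf.length : Int) 0 buf)) (-1) = some ' ' := by
      simp only [PySem.Str.pyGet?, PySem.Chars.pyGet?, String.toList_ofList]
      rw [PySem.List.pyGet?_neg_one, List.getLast?_append,
        pvTail_last (buf.length : Int) buf 0 hbne]
      rfl
    dsimp only
    rw [hlast]
    rw [if_pos (by simp)]
    refine congrArg some (String.toList_inj.mp ?_)
    rw [String.toList_append, String.toList_append, String.toList_ofList, PySem.Str.toList_join]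
    rw [List.map_map]
    simp only [Function.comp_def]
    rw [List.map_congr_left (fun i _ => pvLine_toList buf i)]
    have hch := pvChunks buf buf.length 0 (by omega) (by omega) (Nat.pos_of_ne_zero hb)
    rw [Nat.cast_zero] at hch
    simp only [List.drop_zero, pvHeaderL, if_true] at hch
    show "0000  ".toList ++ pvTailL (buf.length : Int) 0 buf ++ "\n".toList =
      List.intercalate ['\n'] (List.map (pvLineL buf) (PySem.List.pyRange 0 (buf.length : Int) 16))
        ++ "\n".toList
    rw [hch]
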